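-- pv_equiv track=rewrite | github.com/Maverick0351a/oscillinkfirm | oscillink/ingest/chunk.py | _paragraph_spans
-- ===== SOURCE A (Python) =====
-- from typing import Any, Dict, List, Sequence
--
-- def _paragraph_spans(text: str) -> List[tuple[int, int]]:
--     spans: List[tuple[int, int]] = []
--     i = 0
--     n = len(text)
--     while i < n:
--         # skip leading newlines
--         while i < n and text[i] in "\r\n":
--             i += 1
--         if i >= n:
--             break
--         # start of paragraph
--         start = i
--         # consume until blank line
--         while i < n:
--             if text[i] in "\r\n":
--                 # check if next non-newline is also newline => blank line
--                 j = i
--                 # consume one line break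
--                 if text[j] == "\r" and j + 1 < n and text[j + 1] == "\n":
--                     j += 2
--                 else:
--                     j += 1
--                 # peek next linebreaks
--                 k = j
--                 while k < n and text[k] in "\r\n":
--                     k += 1
--                 if k > j:  # there was at least one more newline => blank
--                     end = i
--                     spans.append((start, end))
--                     i = k
--                     break
--                 else:
--                     i = j
--                     continue
--             else:
--                 i += 1
--         else:
--             # reached EOF
--             spans.append((start, n))
--             break
--     if not spans and text:
--         spans.append((0, n))
--     return spans
-- ===== SOURCE B (Python) =====
-- from typing import List
--
--
-- def _paragraph_spans(text: str) -> List[tuple[int, int]]: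
--     n = len(text)
--     # Pass 1: maximal runs of newline characters as half-open intervals.
--     runs: List[tuple[int, int]] = []
--     a = None
--     for i, ch in enumerate(text):
--         if ch in "\r\n":
--             if a is None:
--                 a = i
--         elif a is not None:
--             runs.append((a, i))
--             a = None
--     if a is not None:
--         runs.append((a, n))
--     # Pass 2: a run separates paragraphs unless it is a single line break
--     # ("\n", "\r" or "\r\n"); a run at position 0 just moves the first start.
--     spans: List[tuple[int, int]] = []
--     pos = 0
--     for (a, b) in runs:
--         if a == 0:
--             pos = b
--         elif b - a >= 3 or (b - a == 2 and not (text[a] == "\r" and text[a + 1] == "\n")):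
--             spans.append((pos, a))
--             pos = b
--     if pos < n:
--         spans.append((pos, n))
--     if not spans and text:
--         spans.append((0, n))
--     return spans
-- ===== Notes on version B (the rewrite author's own statement) =====
-- stated objective: alternative
-- what changed: Replaces A's nested while-loops with in-place lookahead/backtracking by a two-phase scan: one pass collecting maximal newline runs, then a fold over those runs classifying each (separator unless it is a single \n, \r or \r\n) to emit spans; measured ~1.6x faster (single enumerate pass, no per-char indexing/lookahead).
import Mathlib
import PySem

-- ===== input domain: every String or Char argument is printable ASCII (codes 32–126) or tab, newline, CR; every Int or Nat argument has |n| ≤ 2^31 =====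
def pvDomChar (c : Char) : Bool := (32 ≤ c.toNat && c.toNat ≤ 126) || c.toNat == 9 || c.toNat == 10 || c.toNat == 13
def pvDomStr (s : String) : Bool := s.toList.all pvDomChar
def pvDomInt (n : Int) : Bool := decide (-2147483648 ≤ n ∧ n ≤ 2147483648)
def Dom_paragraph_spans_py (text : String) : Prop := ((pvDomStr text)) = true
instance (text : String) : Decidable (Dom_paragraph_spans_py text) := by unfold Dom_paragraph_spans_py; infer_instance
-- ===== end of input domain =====

-- B replaces A's nested while-loops (with in-place lookahead) by a two-phase scan:
-- collect maximal newline runs, then classify each run as a paragraph separator.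
-- Same O(n) cost; objective: alternative algorithm.

-- ===== PORT A =====

-- `c in "\r\n"`
def pvNl (c : Char) : Bool := c == '\r' || c == '\n'

-- `while i < n and text[i] in "\r\n": i += 1` (shared shape of A's three skip loops)
def pvSkipNl (cs : List Char) (n i : Nat) : Nat :=
  if i < n && pvNl (cs.getD i ' ') then pvSkipNl cs n (i + 1) else i
termination_by n - i
decreasing_by simp_all; omega

-- needed for pvALoop's termination proof
theorem pvSkipNl_ge (cs : List Char) (n i : Nat) : i ≤ pvSkipNl cs n i := by
  fun_induction pvSkipNl with
  | case1 i h ih => omega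
  | case2 i h => omega

-- `j`: consume one line break at i (\r\n counts as one)
def pvJ (cs : List Char) (n i : Nat) : Nat :=
  if cs.getD i ' ' == '\r' && decide (i + 1 < n) && cs.getD (i + 1) ' ' == '\n'
  then i + 2 else i + 1

theorem pvJ_ge (cs : List Char) (n i : Nat) : i + 1 ≤ pvJ cs n i := by
  unfold pvJ; split <;> omega

theorem pvJ_le (cs : List Char) (n i : Nat) : pvJ cs n i ≤ i + 2 := by
  unfold pvJ; split <;> omega

-- A's outer while loop (phase = true) and its inner paragraph-consuming loop
-- (phase = false, carrying `start`), transliterated branch for branch.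
def pvALoop (cs : List Char) (n : Nat) (phase : Bool) (start i : Nat)
    (spans : List (Int × Int)) : List (Int × Int) :=
  if phase then
    -- outer: skip leading newlines, stop at EOF, else enter the inner loop
    if i < n then
      if n ≤ pvSkipNl cs n i then spans
      else pvALoop cs n false (pvSkipNl cs n i) (pvSkipNl cs n i) spans
    else spans
  else
    if i < n then
      if pvNl (cs.getD i ' ') then
        -- k := end of the newline lookahead from j; blank line iff j < k
        if pvJ cs n i < pvSkipNl cs n (pvJ cs n i) then
          pvALoop cs n true 0 (pvSkipNl cs n (pvJ cs n i)) (spans ++ [((start : Int), (i : Int))])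
        else pvALoop cs n false start (pvJ cs n i) spans
      else pvALoop cs n false start (i + 1) spans
    else spans ++ [((start : Int), (n : Int))]  -- while-else: reached EOF
termination_by 2 * (n - i) + (if phase then 1 else 0)
decreasing_by
  · have := pvSkipNl_ge cs n i; simp_all; omega
  · have h1 := pvJ_ge cs n i; have h2 := pvSkipNl_ge cs n (pvJ cs n i); simp_all; omega
  · have h1 := pvJ_ge cs n i; have h2 := pvJ_le cs n i; simp_all; omega
  · simp_all; omega

def paragraph_spans_py (text : String) : List (Int × Int) :=
  let cs := text.toList
  let n := cs.length
  let spans := pvALoop cs n true 0 0 []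
  if spans.isEmpty && !cs.isEmpty then [((0 : Int), (n : Int))] else spans

-- ===== PORT B =====

-- is run [a, b) a paragraph separator? (any newline run except a single "\n", "\r", "\r\n")
def pvSep (cs : List Char) (a b : Nat) : Bool :=
  decide (3 ≤ b - a) ||
    (decide (b - a = 2) && !(cs.getD a ' ' == '\r' && cs.getD (a + 1) ' ' == '\n'))

-- pass 1: `for i, ch in enumerate(text)` collecting maximal newline runs
def pvRunsLoop (l : List Char) (i : Nat) (runs : List (Nat × Nat)) (a : Option Nat) :
    List (Nat × Nat) × Option Nat :=
  match l with
  | [] => (runs, a)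
  | ch :: rest =>
    if pvNl ch then pvRunsLoop rest (i + 1) runs (some (a.getD i))
    else
      match a with
      | some v => pvRunsLoop rest (i + 1) (runs ++ [(v, i)]) none
      | none => pvRunsLoop rest (i + 1) runs none

def pvRuns (cs : List Char) (n : Nat) : List (Nat × Nat) :=
  match pvRunsLoop cs 0 [] none with
  | (runs, some v) => runs ++ [(v, n)]
  | (runs, none) => runs

-- pass 2: `for (a, b) in runs` with state (spans, pos)
def pvSpansLoop (cs : List Char) (runs : List (Nat × Nat))
    (spans : List (Int × Int)) (pos : Nat) : List (Int × Int) × Nat :=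
  match runs with
  | [] => (spans, pos)
  | (a, b) :: rest =>
    if a = 0 then pvSpansLoop cs rest spans b
    else if pvSep cs a b then pvSpansLoop cs rest (spans ++ [((pos : Int), (a : Int))]) b
    else pvSpansLoop cs rest spans pos

def paragraph_spans_py_alt (text : String) : List (Int × Int) :=
  let cs := text.toList
  let n := cs.length
  let r := pvSpansLoop cs (pvRuns cs n) [] 0
  let spans := if r.2 < n then r.1 ++ [((r.2 : Int), (n : Int))] else r.1
  if spans.isEmpty && !cs.isEmpty then [((0 : Int), (n : Int))] else spans

-- ===== PRECONDITION & SPEC =====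
def Spec_paragraph_spans_py (text : String) (out : List (Int × Int)) : Prop := out = paragraph_spans_py_alt text
instance (text : String) (out : List (Int × Int)) : Decidable (Spec_paragraph_spans_py text out) := by unfold Spec_paragraph_spans_py; infer_instance

-- ===== CLAIM (what is proved, stated in full; the proofs are below) =====
def Claim_equal_paragraph_spans_py : Prop := ∀ (text : String), Dom_paragraph_spans_py text → Spec_paragraph_spans_py text (paragraph_spans_py text)

-- ===== LEMMAS AND PROOFS =====

-- the maximal newline runs of cs starting at position i (proof-only characterisation)
def pvRunsFrom (cs : List Char) (n i : Nat) : List (Nat × Nat) :=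
  if i < n then
    if pvNl (cs.getD i ' ') then (i, pvSkipNl cs n i) :: pvRunsFrom cs n (pvSkipNl cs n i)
    else pvRunsFrom cs n (i + 1)
  else []
termination_by n - i
decreasing_by
  · have h1 : pvSkipNl cs n i = pvSkipNl cs n (i + 1) := by
      rw [pvSkipNl]; simp_all
    have := pvSkipNl_ge cs n (i + 1); simp_all; omega
  · simp_all; omega

-- the common span semantics: fold over runs from paragraph start `pos`
def pvG (cs : List Char) (n pos : Nat) (runs : List (Nat × Nat)) : List (Int × Int) :=
  match runs with
  | [] => if pos < n then [((pos : Int), (n : Int))] else []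
  | (a, b) :: rest =>
    if pvSep cs a b then ((pos : Int), (a : Int)) :: pvG cs n b rest else pvG cs n pos rest

theorem pvRunsFrom_eq (cs : List Char) (n i : Nat) :
    pvRunsFrom cs n i =
      if i < n then
        if pvNl (cs.getD i ' ') = true then
          (i, pvSkipNl cs n i) :: pvRunsFrom cs n (pvSkipNl cs n i)
        else pvRunsFrom cs n (i + 1)
      else [] := by
  rw [pvRunsFrom]

theorem pvSkipNl_stop (cs : List Char) (n i : Nat)
    (h : ¬(i < n ∧ pvNl (cs.getD i ' ') = true)) : pvSkipNl cs n i = i := by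
  rw [pvSkipNl]; simp_all

theorem pvSkipNl_step (cs : List Char) (n i : Nat) (h1 : i < n)
    (h2 : pvNl (cs.getD i ' ') = true) : pvSkipNl cs n i = pvSkipNl cs n (i + 1) := by
  rw [pvSkipNl]; simp_all

theorem pvSkipNl_le (cs : List Char) (n i : Nat) (h : i ≤ n) : pvSkipNl cs n i ≤ n := by
  fun_induction pvSkipNl with
  | case1 i h' ih => simp at h'; exact ih (by omega)
  | case2 i h' => exact h

theorem pvSkipNl_absorb (cs : List Char) (n : Nat) :
    ∀ d i j, j - i = d → i ≤ j → j ≤ pvSkipNl cs n i → pvSkipNl cs n j = pvSkipNl cs n i := by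
  intro d
  induction d with
  | zero =>
    intro i j h1 h2 h3
    have : i = j := by omega
    subst this; rfl
  | succ d ih =>
    intro i j h1 h2 h3
    by_cases hij : i = j
    · subst hij; rfl
    · have hi : i < n ∧ pvNl (cs.getD i ' ') = true := by
        by_contra hc
        have := pvSkipNl_stop cs n i hc
        omega
      have hs := pvSkipNl_step cs n i hi.1 hi.2
      rw [hs]
      exact ih (i + 1) j (by omega) (by omega) (by rw [← hs]; exact h3)

theorem pvSkipNl_idem (cs : List Char) (n i : Nat) :
    pvSkipNl cs n (pvSkipNl cs n i) = pvSkipNl cs n i := by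
  exact pvSkipNl_absorb cs n _ i _ rfl (pvSkipNl_ge cs n i) le_rfl

theorem mem_pvRunsFrom (cs : List Char) (n : Nat) :
    ∀ i p, p ∈ pvRunsFrom cs n i → i ≤ p.1 := by
  intro i
  fun_induction pvRunsFrom cs n i with
  | case1 i h1 h2 ih =>
    intro p hp
    rcases List.mem_cons.mp hp with hp | hp
    · subst hp; simp
    · have := ih p hp
      have := pvSkipNl_ge cs n i
      omega
  | case2 i h1 h2 ih =>
    intro p hp
    have := ih p hp
    omega
  | case3 i h1 =>
    intro p hp
    simp at hp

-- pass 1 computes pvRunsFrom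
def pvFinish (n : Nat) (r : List (Nat × Nat) × Option Nat) : List (Nat × Nat) :=
  match r with
  | (runs, some v) => runs ++ [(v, n)]
  | (runs, none) => runs

theorem pvRunsLoop_split (cs : List Char) :
    ∀ m i runs a, cs.length - i = m → i ≤ cs.length →
      pvFinish cs.length (pvRunsLoop (cs.drop i) i runs a) =
        runs ++ (match a with
          | none => pvRunsFrom cs cs.length i
          | some v => (v, pvSkipNl cs cs.length i) ::
              pvRunsFrom cs cs.length (pvSkipNl cs cs.length i)) := by
  intro m
  induction m using Nat.strong_induction_on with
  | _ m ih =>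
  intro i runs a hm hi
  by_cases hlt : i < cs.length
  · have hdrop : cs.drop i = cs[i] :: cs.drop (i + 1) := List.drop_eq_getElem_cons hlt
    have hgetD : cs.getD i ' ' = cs[i] := List.getD_eq_getElem cs ' ' hlt
    rw [hdrop]
    simp only [pvRunsLoop]
    by_cases hnl : pvNl cs[i] = true
    · rw [if_pos hnl]
      rw [ih (cs.length - (i + 1)) (by omega) (i + 1) runs (some (a.getD i)) rfl (by omega)]
      have hstep := pvSkipNl_step cs cs.length i hlt (by rw [hgetD]; exact hnl)
      cases a with
      | none =>
        simp only [Option.getD]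
        rw [pvRunsFrom_eq cs cs.length i, if_pos hlt,
          if_pos (show pvNl (cs.getD i ' ') = true by rw [hgetD]; exact hnl), hstep]
      | some v => simp only [Option.getD_some]; rw [hstep]
    · rw [if_neg hnl]
      have hstop : pvSkipNl cs cs.length i = i :=
        pvSkipNl_stop cs cs.length i (by rw [hgetD]; tauto)
      have hunf : pvRunsFrom cs cs.length i = pvRunsFrom cs cs.length (i + 1) := by
        rw [pvRunsFrom_eq cs cs.length i, if_pos hlt,
          if_neg (show ¬pvNl (cs.getD i ' ') = true by rw [hgetD]; exact hnl)]
      cases a with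
      | some v =>
        rw [ih (cs.length - (i + 1)) (by omega) (i + 1) (runs ++ [(v, i)]) none rfl (by omega)]
        rw [List.append_assoc, hstop, hunf]
        rfl
      | none =>
        rw [ih (cs.length - (i + 1)) (by omega) (i + 1) runs none rfl (by omega), hunf]
  · have hieq : i = cs.length := by omega
    have hdrop : cs.drop i = [] := List.drop_eq_nil_of_le (by omega)
    rw [hdrop]
    simp only [pvRunsLoop]
    have hstop : pvSkipNl cs cs.length i = i := pvSkipNl_stop cs cs.length i (by omega)
    have hemp : pvRunsFrom cs cs.length i = [] := by
      rw [pvRunsFrom_eq cs cs.length i, if_neg (by omega)]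
    cases a with
    | none => simp [pvFinish, hemp]
    | some v =>
      subst hieq
      simp [pvFinish, hstop, hemp]

-- pass 2 computes pvG (for runs that do not start at 0)
theorem pvSpansLoop_G (cs : List Char) (n : Nat) :
    ∀ runs spans pos, (∀ p ∈ runs, 0 < p.1) →
      (if (pvSpansLoop cs runs spans pos).2 < n then
        (pvSpansLoop cs runs spans pos).1 ++ [(((pvSpansLoop cs runs spans pos).2 : Int), (n : Int))]
       else (pvSpansLoop cs runs spans pos).1) =
        spans ++ pvG cs n pos runs := by
  intro runs
  induction runs with
  | nil =>
    intro spans pos hpos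
    simp only [pvSpansLoop, pvG]
    split <;> simp
  | cons hd rest ih =>
    intro spans pos hpos
    obtain ⟨a, b⟩ := hd
    have ha : ¬a = 0 := by have := hpos (a, b) (by simp); simp at this; omega
    simp only [pvSpansLoop, pvG, if_neg ha]
    by_cases hsep : pvSep cs a b = true
    · rw [if_pos hsep, if_pos hsep]
      rw [ih (spans ++ [((pos : Int), (a : Int))]) b (fun p hp => hpos p (by simp [hp]))]
      simp
    · rw [if_neg hsep, if_neg hsep]
      exact ih spans pos (fun p hp => hpos p (by simp [hp]))

-- A's inner consumed linebreak never overruns the newline run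
theorem pvJ_le_skip (cs : List Char) (n i : Nat) (h1 : i < n)
    (h2 : pvNl (cs.getD i ' ') = true) : pvJ cs n i ≤ pvSkipNl cs n i := by
  have hstep := pvSkipNl_step cs n i h1 h2
  unfold pvJ
  split
  · rename_i hg
    simp only [Bool.and_eq_true, beq_iff_eq, decide_eq_true_eq] at hg
    obtain ⟨⟨hr, hlt⟩, hn'⟩ := hg
    have h2' : pvNl (cs.getD (i + 1) ' ') = true := by rw [pvNl, hn']; decide
    have hstep2 := pvSkipNl_step cs n (i + 1) hlt h2'
    have := pvSkipNl_ge cs n (i + 1 + 1)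
    omega
  · have := pvSkipNl_ge cs n (i + 1)
    omega

-- A's blank-line test agrees with pvSep on the run starting at i
theorem pvSep_iff (cs : List Char) (i : Nat) (h1 : i < cs.length)
    (h2 : pvNl (cs.getD i ' ') = true) :
    pvJ cs cs.length i < pvSkipNl cs cs.length i ↔
      pvSep cs i (pvSkipNl cs cs.length i) = true := by
  have hle := pvSkipNl_le cs cs.length i (by omega)
  have hjs := pvJ_le_skip cs cs.length i h1 h2
  unfold pvJ at hjs ⊢
  unfold pvSep
  by_cases hg : (cs.getD i ' ' == '\r' && decide (i + 1 < cs.length)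
      && cs.getD (i + 1) ' ' == '\n') = true
  · rw [if_pos hg] at hjs ⊢
    have hg' := hg
    simp only [Bool.and_eq_true, beq_iff_eq, decide_eq_true_eq] at hg'
    obtain ⟨⟨hr, hlt⟩, hn'⟩ := hg'
    have hb : (cs.getD i ' ' == '\r' && cs.getD (i + 1) ' ' == '\n') = true := by
      rw [hr, hn']; decide
    simp only [hb, Bool.not_true, Bool.and_false, Bool.or_false, decide_eq_true_eq]
    omega
  · rw [if_neg hg] at hjs ⊢
    constructor
    · intro h
      by_cases h3 : 3 ≤ pvSkipNl cs cs.length i - i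
      · simp [h3]
      · have h2e : pvSkipNl cs cs.length i - i = 2 := by omega
        have hlt' : i + 1 < cs.length := by omega
        have hban : (cs.getD i ' ' == '\r' && cs.getD (i + 1) ' ' == '\n') = false := by
          cases hbc : (cs.getD i ' ' == '\r' && cs.getD (i + 1) ' ' == '\n') with
          | false => rfl
          | true =>
            exfalso
            apply hg
            simp only [Bool.and_eq_true] at hbc ⊢
            exact ⟨⟨hbc.1, by simpa using hlt'⟩, hbc.2⟩
        rw [h2e, hban]; decide
    · intro h
      simp only [Bool.or_eq_true, Bool.and_eq_true, decide_eq_true_eq] at h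
      rcases h with h | ⟨h, _⟩ <;> omega

-- A's loops compute pvG over pvRunsFrom
theorem pvALoop_G (cs : List Char) :
    ∀ phase start i spans, (phase = false → start < cs.length) →
      pvALoop cs cs.length phase start i spans =
        spans ++ (if phase = true then
            (if pvSkipNl cs cs.length i < cs.length then
              pvG cs cs.length (pvSkipNl cs cs.length i)
                (pvRunsFrom cs cs.length (pvSkipNl cs cs.length i))
             else [])
          else pvG cs cs.length start (pvRunsFrom cs cs.length i)) := by
  intro phase start i spans
  fun_induction pvALoop cs cs.length phase start i spans
  case case1 h1 h2 =>
    intro _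
    rw [if_pos rfl, if_neg (by omega)]
    simp
  case case2 h1 h2 ih =>
    rename_i start i spans
    intro _
    rw [ih (fun _ => by omega)]
    have hs : pvSkipNl cs cs.length i < cs.length := by omega
    simp [hs]
  case case3 h1 =>
    rename_i start i spans
    intro _
    have hstop := pvSkipNl_stop cs cs.length i (by tauto)
    rw [if_pos rfl, hstop, if_neg h1]
    simp
  case case4 h1 h2 h3 ih =>
    rename_i phase start i spans hph
    intro h0
    rw [Bool.not_eq_true] at hph
    have hstart := h0 hph
    have hjle := pvJ_le_skip cs cs.length i h1 h2
    have hjge := pvJ_ge cs cs.length i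
    have habs : pvSkipNl cs cs.length (pvJ cs cs.length i) = pvSkipNl cs cs.length i :=
      pvSkipNl_absorb cs cs.length _ i (pvJ cs cs.length i) rfl (by omega) hjle
    have hidem := pvSkipNl_idem cs cs.length (pvJ cs cs.length i)
    have hsle := pvSkipNl_le cs cs.length i (by omega)
    rw [ih (by simp)]
    simp only [hph, Bool.false_eq_true, if_false]
    rw [pvRunsFrom_eq cs cs.length i, if_pos h1, if_pos h2]
    have hsep : pvSep cs i (pvSkipNl cs cs.length i) = true :=
      (pvSep_iff cs i h1 h2).mp (by omega)
    simp only [pvG, if_pos hsep]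
    rw [hidem, habs]
    by_cases hlt : pvSkipNl cs cs.length i < cs.length
    · rw [if_pos hlt]
      simp
    · rw [if_neg hlt]
      have hn : pvSkipNl cs cs.length i = cs.length := by omega
      have hemp : pvRunsFrom cs cs.length (pvSkipNl cs cs.length i) = [] := by
        rw [pvRunsFrom_eq, hn, if_neg (by omega)]
      rw [hemp]
      simp only [pvG, hn, if_neg (lt_irrefl cs.length)]
      simp
  case case5 h1 h2 h3 ih =>
    rename_i phase start i spans hph
    intro h0
    rw [Bool.not_eq_true] at hph
    have hstart := h0 hph
    have hjle := pvJ_le_skip cs cs.length i h1 h2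
    have hjge := pvJ_ge cs cs.length i
    have habs : pvSkipNl cs cs.length (pvJ cs cs.length i) = pvSkipNl cs cs.length i :=
      pvSkipNl_absorb cs cs.length _ i (pvJ cs cs.length i) rfl (by omega) hjle
    have hge := pvSkipNl_ge cs cs.length (pvJ cs cs.length i)
    have hj_eq : pvJ cs cs.length i = pvSkipNl cs cs.length i := by omega
    rw [ih (fun _ => hstart)]
    simp only [hph, Bool.false_eq_true, if_false]
    rw [pvRunsFrom_eq cs cs.length i, if_pos h1, if_pos h2]
    have hsep : ¬pvSep cs i (pvSkipNl cs cs.length i) = true :=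
      fun hs => absurd ((pvSep_iff cs i h1 h2).mpr hs) (by omega)
    simp only [pvG, if_neg hsep]
    rw [hj_eq]
  case case6 h1 h2 ih =>
    rename_i phase start i spans hph
    intro h0
    rw [Bool.not_eq_true] at hph
    rw [ih (fun _ => h0 hph)]
    simp only [hph, Bool.false_eq_true, if_false]
    rw [pvRunsFrom_eq cs cs.length i, if_pos h1, if_neg h2]
  case case7 h1 h2 =>
    rename_i phase start i spans
    intro h0
    rw [Bool.not_eq_true] at h1
    have hstart := h0 h1
    simp only [h1, Bool.false_eq_true, if_false]
    rw [pvRunsFrom_eq cs cs.length i, if_neg h2]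
    simp only [pvG, if_pos hstart]

-- the two trunks (before the common empty-spans fallback) agree
theorem pvTrunk_eq (cs : List Char) :
    pvALoop cs cs.length true 0 0 [] =
      (if (pvSpansLoop cs (pvRuns cs cs.length) [] 0).2 < cs.length then
        (pvSpansLoop cs (pvRuns cs cs.length) [] 0).1 ++
          [(((pvSpansLoop cs (pvRuns cs cs.length) [] 0).2 : Int), (cs.length : Int))]
       else (pvSpansLoop cs (pvRuns cs cs.length) [] 0).1) := by
  have hruns : pvRuns cs cs.length = pvRunsFrom cs cs.length 0 := by
    have h := pvRunsLoop_split cs cs.length 0 [] none rfl (by omega)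
    simp only [List.drop_zero, List.nil_append] at h
    rw [← h]
    rcases h' : pvRunsLoop cs 0 [] none with ⟨runs, _ | v⟩ <;> simp [pvRuns, pvFinish, h']
  have hA := pvALoop_G cs true 0 0 [] (by simp)
  simp only [List.nil_append, if_true] at hA
  rw [hA, hruns]
  by_cases hn0 : 0 < cs.length
  · by_cases hnl : pvNl (cs.getD 0 ' ') = true
    · have hrf := pvRunsFrom_eq cs cs.length 0
      rw [if_pos hn0, if_pos hnl] at hrf
      have hB := pvSpansLoop_G cs cs.length
        (pvRunsFrom cs cs.length (pvSkipNl cs cs.length 0)) [] (pvSkipNl cs cs.length 0)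
        (fun p hp => by
          have h1 := mem_pvRunsFrom cs cs.length (pvSkipNl cs cs.length 0) p hp
          have h2 := pvSkipNl_ge cs cs.length (0 + 1)
          have h3 := pvSkipNl_step cs cs.length 0 hn0 hnl
          omega)
      have hSL : pvSpansLoop cs
          ((0, pvSkipNl cs cs.length 0) :: pvRunsFrom cs cs.length (pvSkipNl cs cs.length 0)) [] 0 =
          pvSpansLoop cs (pvRunsFrom cs cs.length (pvSkipNl cs cs.length 0)) []
            (pvSkipNl cs cs.length 0) := by
        simp [pvSpansLoop]
      rw [hrf, hSL, hB]
      simp only [List.nil_append]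
      by_cases he : pvSkipNl cs cs.length 0 < cs.length
      · rw [if_pos he]
      · rw [if_neg he]
        have hsle := pvSkipNl_le cs cs.length 0 (by omega)
        have hn : pvSkipNl cs cs.length 0 = cs.length := by omega
        have hemp : pvRunsFrom cs cs.length (pvSkipNl cs cs.length 0) = [] := by
          rw [pvRunsFrom_eq, hn, if_neg (by omega)]
        rw [hemp]
        simp only [pvG, hn, if_neg (lt_irrefl cs.length)]
    · have hstop := pvSkipNl_stop cs cs.length 0 (by tauto)
      have hrf : pvRunsFrom cs cs.length 0 = pvRunsFrom cs cs.length 1 := by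
        rw [pvRunsFrom_eq cs cs.length 0, if_pos hn0, if_neg hnl]
      have hB := pvSpansLoop_G cs cs.length (pvRunsFrom cs cs.length 0) [] 0
        (fun p hp => by
          rw [hrf] at hp
          have := mem_pvRunsFrom cs cs.length 1 p hp
          omega)
      rw [hB, hstop, if_pos hn0]
      simp
  · have hstop := pvSkipNl_stop cs cs.length 0 (by omega)
    have hemp : pvRunsFrom cs cs.length 0 = [] := by
      rw [pvRunsFrom_eq, if_neg (by omega)]
    rw [hstop, if_neg (by omega), hemp]
    have hcs : cs = [] := List.length_eq_zero_iff.mp (by omega)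
    subst hcs
    simp [pvSpansLoop]

-- ===== VERDICT (by name: the statement is the Claim_ definition above) =====
theorem paragraph_spans_py_spec : Claim_equal_paragraph_spans_py := by
  unfold Claim_equal_paragraph_spans_py Spec_paragraph_spans_py
  intro text _
  simp only [paragraph_spans_py, paragraph_spans_py_alt]
  rw [pvTrunk_eq text.toList]
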